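-- pv_equiv track=rewrite | github.com/MOAAS/ZhedAI | Scheduling/optimization.py | evaluate
-- ===== SOURCE A (Python) =====
-- inscricoes = [
--     [1,2,3,4,5],
--     [6,7,8,9],
--     [10,11,12],
--     [1,2,3,4],
--     [5,6,7,8],
--     [9,10,11,12],
--     [1,2,3,5],
--     [6,7,8],
--     [4,9,10,11,12],
--     [1,2,4,5],
--     [3,6,7,8],
--     [9,10,11,12]
-- ]
--
-- numAlunos = 12 # 12
--
-- def evaluate(result : list) -> int:
--     alunos = [[] for i in range(numAlunos)]
--     for disciplina in range(len(result)):
--         slot = result[disciplina] # slot = 4  disciplina = 0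
--         for inscricao in inscricoes[disciplina]: # inscricao = 1
--             alunos[inscricao - 1].append(slot)
--
--     numOverlappings = 0
--     for aluno in alunos:
--         if len(aluno) != len(set(aluno)):
--             numOverlappings += 1
--     return numOverlappings
-- ===== SOURCE B (Python) =====
-- inscricoes = [
--     [1,2,3,4,5],
--     [6,7,8,9],
--     [10,11,12],
--     [1,2,3,4],
--     [5,6,7,8],
--     [9,10,11,12],
--     [1,2,3,5],
--     [6,7,8],
--     [4,9,10,11,12],
--     [1,2,4,5],
--     [3,6,7,8],
--     [9,10,11,12]
-- ]
--
-- numAlunos = 12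
--
-- def evaluate(result: list) -> int:
--     # student-major traversal: for each student, collect the slots of the
--     # disciplines they are enrolled in, and count students with a repeated slot
--     n = len(result)
--     count = 0
--     for student in range(1, numAlunos + 1):
--         slots = [result[d] for d in range(n) if student in inscricoes[d]]
--         if len(slots) != len(set(slots)):
--             count += 1
--     return count
-- ===== Notes on version B (the rewrite author's own statement) =====
-- stated objective: alternative
-- what changed: B replaces A's discipline-major pass that mutates 12 per-student accumulator lists with a student-major traversal that, for each student, directly collects the slots of their disciplines by a comprehension and tests it for duplicates.
import Mathlib
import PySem

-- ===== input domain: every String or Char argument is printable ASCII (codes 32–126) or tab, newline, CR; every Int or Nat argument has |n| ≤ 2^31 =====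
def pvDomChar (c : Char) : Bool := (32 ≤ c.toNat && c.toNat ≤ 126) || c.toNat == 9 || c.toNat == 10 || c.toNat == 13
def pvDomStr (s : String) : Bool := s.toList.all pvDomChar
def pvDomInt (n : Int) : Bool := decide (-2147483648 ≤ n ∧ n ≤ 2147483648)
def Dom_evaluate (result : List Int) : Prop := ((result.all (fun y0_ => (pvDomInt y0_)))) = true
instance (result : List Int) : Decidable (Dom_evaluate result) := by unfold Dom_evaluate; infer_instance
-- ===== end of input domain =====

-- B re-implements A by a student-major traversal (inverted view) instead of A's
-- discipline-major accumulation into per-student lists; objective: alternative.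

-- the module constant 'inscricoes'
def inscricoes : List (List Int) :=
  [[1,2,3,4,5],[6,7,8,9],[10,11,12],[1,2,3,4],[5,6,7,8],[9,10,11,12],
   [1,2,3,5],[6,7,8],[4,9,10,11,12],[1,2,4,5],[3,6,7,8],[9,10,11,12]]

-- ===== PORT A =====
-- one discipline step of A: append slot to the list of each enrolled student
def stepA (slot : Int) (al : List (List Int)) (i : Int) : List (List Int) :=
  al.set (i - 1).toNat ((al.getD (i - 1).toNat []) ++ [slot])

-- discipline-major: build alunos (12 per-student slot lists), then count lists with duplicates.
-- inscricoes[disciplina] raises IndexError when len(result) > 12: excluded by Pre_evaluate,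
-- ported with getD (values of inscricoes are the literals 1..12, so (i-1).toNat is exact).
def evaluate (result : List Int) : Int :=
  let alunos : List (List Int) := (List.range 12).map (fun _ => [])
  let alunos := (List.range result.length).foldl (fun al disciplina =>
    let slot := result.getD disciplina 0
    (inscricoes.getD disciplina []).foldl (stepA slot) al) alunos
  alunos.foldl (fun n aluno =>
    if aluno.length ≠ (PySem.Set.ofList aluno).length then n + 1 else n) 0

-- ===== PORT B =====
-- student-major: for each student 1..12, the slots of their disciplines, counted if repeated.
def evaluate_alt (result : List Int) : Int :=
  (PySem.List.pyRange 1 13 1).foldl (fun count student =>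
    let slots := ((List.range result.length).filter
        (fun d => (inscricoes.getD d []).contains student)).map (fun d => result.getD d 0)
    if slots.length ≠ (PySem.Set.ofList slots).length then count + 1 else count) 0

-- ===== PRECONDITION & SPEC =====
-- Pre_ excludes len(result) > 12, on which A (and B) raise IndexError indexing inscricoes.
def Pre_evaluate (result : List Int) : Prop := result.length ≤ 12
instance (result : List Int) : Decidable (Pre_evaluate result) := by unfold Pre_evaluate; infer_instance
def pvWitness_evaluate : List Int := [3, 1, 2, 3, 1, 2, 0, 1, 2, 0, 1, 2]

def Spec_evaluate (result : List Int) (out : Int) : Prop := out = evaluate_alt result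
instance (result : List Int) (out : Int) : Decidable (Spec_evaluate result out) := by unfold Spec_evaluate; infer_instance

-- ===== CLAIM (what is proved, stated in full; the proofs are below) =====
def Claim_equal_evaluate : Prop := ∀ (result : List Int), Dom_evaluate result → Pre_evaluate result → Spec_evaluate result (evaluate result)

-- ===== LEMMAS AND PROOFS =====

-- slots student s (0-based) accumulates from the first k disciplines
def slotsUpTo (result : List Int) (k : Nat) (s : Nat) : List Int :=
  ((List.range k).filter (fun d => (inscricoes.getD d []).contains ((s : Int) + 1))).map
    (fun d => result.getD d 0)

theorem rowGood (k : Nat) :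
    (inscricoes.getD k []).Nodup ∧ ∀ i ∈ inscricoes.getD k [], 1 ≤ i ∧ i ≤ 12 := by
  by_cases h : k < 12
  · interval_cases k <;> decide
  · rw [List.getD_eq_default]
    · exact ⟨List.nodup_nil, by intro i hi; cases hi⟩
    · simpa [inscricoes] using Nat.le_of_not_lt h

theorem foldl_row (L : List Int) (hnd : L.Nodup) (hb : ∀ i ∈ L, 1 ≤ i ∧ i ≤ 12)
    (slot : Int) (al : List (List Int)) (hlen : al.length = 12) :
    (L.foldl (stepA slot) al).length = 12 ∧
      ∀ s : Nat, (L.foldl (stepA slot) al).getD s [] =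
        al.getD s [] ++ (if L.contains ((s : Int) + 1) then [slot] else []) := by
  induction L generalizing al with
  | nil => exact ⟨hlen, fun s => by simp⟩
  | cons i L' ih =>
    have hi := hb i (List.mem_cons_self ..)
    have hm : ((i - 1).toNat : Int) = i - 1 := Int.toNat_of_nonneg (by omega)
    have hmlt : (i - 1).toNat < 12 := by omega
    have hnotmem : i ∉ L' := (List.nodup_cons.mp hnd).1
    have hlen' : (stepA slot al i).length = 12 := by
      simp [stepA, hlen]
    obtain ⟨h1, h2⟩ := ih (List.nodup_cons.mp hnd).2
      (fun j hj => hb j (List.mem_cons_of_mem _ hj)) (stepA slot al i) hlen'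
    refine ⟨by simpa using h1, fun s => ?_⟩
    rw [List.foldl_cons, h2 s]
    by_cases hs : s = (i - 1).toNat
    · subst hs
      have hcont : ((i - 1).toNat : Int) + 1 = i := by omega
      have hnc : ¬ L'.contains (((i - 1).toNat : Int) + 1) = true := by
        rw [hcont]; simpa using hnotmem
      have hset : (stepA slot al i).getD (i - 1).toNat [] =
          al.getD (i - 1).toNat [] ++ [slot] := by
        simp only [stepA, List.getD_eq_getElem?_getD]
        rw [List.getElem?_set_self (by omega)]
        simp
      rw [hset]
      have hq : ((i.toNat - 1 : Nat) : Int) + 1 = i := by omega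
      simp [hq, hnotmem]
    · have hne : ¬ (((s : Int) + 1) == i) = true := by
        simp only [beq_iff_eq]; omega
      have hset : (stepA slot al i).getD s [] = al.getD s [] := by
        simp only [stepA, List.getD_eq_getElem?_getD]
        rw [List.getElem?_set_ne (by omega : (i - 1).toNat ≠ s)]
      rw [hset]
      have hne' : ¬ ((s : Int) + 1 = i) := by omega
      simp [hne']

theorem foldl_disc (result : List Int) (n : Nat) :
    ((List.range n).foldl
        (fun al disciplina =>
          (inscricoes.getD disciplina []).foldl (stepA (result.getD disciplina 0)) al)
        ((List.range 12).map (fun _ => ([] : List Int)))).length = 12 ∧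
      ∀ s : Nat,
        ((List.range n).foldl
            (fun al disciplina =>
              (inscricoes.getD disciplina []).foldl (stepA (result.getD disciplina 0)) al)
            ((List.range 12).map (fun _ => ([] : List Int)))).getD s [] =
          slotsUpTo result n s := by
  induction n with
  | zero =>
    constructor
    · simp
    · intro s
      simp only [slotsUpTo, List.range_zero, List.filter_nil, List.map_nil,
        List.foldl_nil, List.getD_eq_getElem?_getD, List.getElem?_map]
      cases (List.range 12)[s]? <;> rfl
  | succ n ih =>
    obtain ⟨h1, h2⟩ := ih
    rw [show List.range (n+1) = List.range n ++ [n] from List.range_succ,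
      List.foldl_append, List.foldl_cons, List.foldl_nil]
    have hrow := rowGood n
    obtain ⟨hL, hS⟩ := foldl_row _ hrow.1 hrow.2 (result.getD n 0) _ h1
    refine ⟨hL, fun s => ?_⟩
    rw [hS s, h2 s]
    simp [slotsUpTo, show List.range (n+1) = List.range n ++ [n] from List.range_succ,
      List.filter_append, List.filter_cons, List.filter_nil]
    split_ifs <;> simp

theorem evaluate_eq (result : List Int) : evaluate result = evaluate_alt result := by
  obtain ⟨h1, h2⟩ := foldl_disc result result.length
  have halunos :
      (List.range result.length).foldl
          (fun al disciplina =>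
            (inscricoes.getD disciplina []).foldl (stepA (result.getD disciplina 0)) al)
          ((List.range 12).map (fun _ => ([] : List Int))) =
        (List.range 12).map (fun s => slotsUpTo result result.length s) := by
    apply List.ext_getElem
    · rw [h1]; simp
    · intro i hi1 hi2
      have h := h2 i
      rw [List.getD_eq_getElem?_getD, List.getElem?_eq_getElem hi1] at h
      simpa using h
  simp only [evaluate, evaluate_alt]
  rw [halunos, List.foldl_map]
  rw [show PySem.List.pyRange 1 13 1 = (List.range 12).map (fun k : Nat => (1 : Int) + (k : Int)) from by rfl]
  rw [List.foldl_map]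
  apply PySem.List.foldl_congr_mem
  intro acc k _
  rw [Int.add_comm 1 (k : Int)]
  simp only [slotsUpTo]
  rfl

-- ===== VERDICT (by name: the statement is the Claim_ definition above) =====
theorem evaluate_spec : Claim_equal_evaluate := by
  intro result _ _
  exact evaluate_eq result
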